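-- pv_equiv track=rewrite | github.com/bendevlin18/GEO_llm | spaces/app.py | detect_shards
-- ===== SOURCE A (Python) =====
-- MODALITY_SIGNALS = {
--     "rnaseq_singlecell": [
--         "single-cell", "scrna", "scrnaseq", "sc rna", "10x", "dropseq",
--         "drop-seq", "smart-seq", "inDrop", "single cell rna",
--     ],
--     "rnaseq_snrnaseq": [
--         "single nucleus", "snrna", "snrnaseq", "sn rna", "single-nucleus",
--         "nuclear rna", "snuc",
--     ],
--     "rnaseq_spatial": [
--         "spatial", "visium", "merfish", "slide-seq", "slideseq",
--         "stereo-seq", "seqfish", "spatial transcriptom",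
--     ],
--     "rnaseq_bulk": [
--         "bulk rna", "bulk-rna", "total rna", "rna-seq", "rnaseq",
--         "gene expression", "transcriptom",
--     ],
--     "chipseq": [
--         "chip-seq", "chipseq", "chip seq", "histone", "h3k4", "h3k27",
--         "h3k36", "h3k9", "transcription factor", "tf binding", "chip",
--     ],
--     "atacseq": [
--         "atac", "chromatin accessibility", "open chromatin", "dnase",
--     ],
--     "cut_run_tag": [
--         "cut&run", "cut and run", "cut&tag", "cut and tag", "cutana",
--     ],
--     "methylation": [
--         "methylation", "wgbs", "rrbs", "bisulfite", "cpg", "5mc", "5hmc",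
--         "dnmt", "methylom", "em-seq", "medip",
--     ],
--     "multiomics": [
--         "cite-seq", "cite seq", "multiome", "10x multiome", "share-seq",
--         "multi-omic", "multiomics", "rna+atac", "protein and rna",
--     ],
-- }
--
-- def detect_shards(query: str) -> list[str]:
--     """Return ordered list of shard keys to search, based on query signals."""
--     q = query.lower()
--     scores: dict[str, int] = {k: 0 for k in MODALITY_SIGNALS}
--     for shard_key, signals in MODALITY_SIGNALS.items():
--         for sig in signals:
--             if sig in q:
--                 scores[shard_key] += 1
--
--     # Pick shards with any signal, sorted by score
--     matched = sorted([k for k, v in scores.items() if v > 0], key=lambda k: -scores[k])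
--
--     if not matched:
--         # No explicit modality signal — default to single-cell (most common complex query)
--         # and snRNA + spatial as secondary
--         return ["rnaseq_singlecell", "rnaseq_snrnaseq", "rnaseq_spatial"]
--
--     return matched
-- ===== SOURCE B (Python) =====
-- MODALITY_SIGNALS = {
--     "rnaseq_singlecell": [
--         "single-cell", "scrna", "scrnaseq", "sc rna", "10x", "dropseq",
--         "drop-seq", "smart-seq", "inDrop", "single cell rna",
--     ],
--     "rnaseq_snrnaseq": [
--         "single nucleus", "snrna", "snrnaseq", "sn rna", "single-nucleus",
--         "nuclear rna", "snuc",
--     ],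
--     "rnaseq_spatial": [
--         "spatial", "visium", "merfish", "slide-seq", "slideseq",
--         "stereo-seq", "seqfish", "spatial transcriptom",
--     ],
--     "rnaseq_bulk": [
--         "bulk rna", "bulk-rna", "total rna", "rna-seq", "rnaseq",
--         "gene expression", "transcriptom",
--     ],
--     "chipseq": [
--         "chip-seq", "chipseq", "chip seq", "histone", "h3k4", "h3k27",
--         "h3k36", "h3k9", "transcription factor", "tf binding", "chip",
--     ],
--     "atacseq": [
--         "atac", "chromatin accessibility", "open chromatin", "dnase",
--     ],
--     "cut_run_tag": [
--         "cut&run", "cut and run", "cut&tag", "cut and tag", "cutana",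
--     ],
--     "methylation": [
--         "methylation", "wgbs", "rrbs", "bisulfite", "cpg", "5mc", "5hmc",
--         "dnmt", "methylom", "em-seq", "medip",
--     ],
--     "multiomics": [
--         "cite-seq", "cite seq", "multiome", "10x multiome", "share-seq",
--         "multi-omic", "multiomics", "rna+atac", "protein and rna",
--     ],
-- }
--
--
-- def detect_shards(query: str) -> list[str]:
--     """Counting-sort variant: group shards by match count, emit groups in
--     descending count order (insertion order inside a group)."""
--     q = query.lower()
--     scores = [
--         (k, sum(1 if sig in q else 0 for sig in sigs))
--         for k, sigs in MODALITY_SIGNALS.items()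
--     ]
--     top = max((s for _, s in scores), default=0)
--     if top == 0:
--         return ["rnaseq_singlecell", "rnaseq_snrnaseq", "rnaseq_spatial"]
--     return [k for v in range(top, 0, -1) for k, s in scores if s == v]
-- ===== Notes on version B (the rewrite author's own statement) =====
-- stated objective: alternative
-- what changed: Replaces A's dict-of-scores plus key-based comparison sort by a per-shard (key, count) list, its maximum, and a counting/bucket pass that emits shards grouped by score from the maximum down to 1 (insertion order inside each group).
import Mathlib
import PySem

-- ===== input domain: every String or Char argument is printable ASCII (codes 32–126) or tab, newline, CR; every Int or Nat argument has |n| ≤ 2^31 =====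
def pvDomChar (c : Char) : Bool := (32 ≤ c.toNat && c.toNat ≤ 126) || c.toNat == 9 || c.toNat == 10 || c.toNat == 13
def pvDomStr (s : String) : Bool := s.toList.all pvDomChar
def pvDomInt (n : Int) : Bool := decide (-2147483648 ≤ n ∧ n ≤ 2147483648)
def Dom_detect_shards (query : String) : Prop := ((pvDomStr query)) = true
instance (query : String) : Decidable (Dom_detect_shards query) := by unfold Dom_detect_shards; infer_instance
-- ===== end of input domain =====

-- B replaces A's dict-of-scores + comparison sort by a per-shard count list and a
-- counting (bucket) pass over score values from the maximum down to 1 (objective: alternative).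

-- The module constant MODALITY_SIGNALS (a dict of lists), as an association list.
def pvSignals : List (String × List String) :=
  [ ("rnaseq_singlecell", ["single-cell", "scrna", "scrnaseq", "sc rna", "10x", "dropseq",
      "drop-seq", "smart-seq", "inDrop", "single cell rna"]),
    ("rnaseq_snrnaseq", ["single nucleus", "snrna", "snrnaseq", "sn rna", "single-nucleus",
      "nuclear rna", "snuc"]),
    ("rnaseq_spatial", ["spatial", "visium", "merfish", "slide-seq", "slideseq",
      "stereo-seq", "seqfish", "spatial transcriptom"]),
    ("rnaseq_bulk", ["bulk rna", "bulk-rna", "total rna", "rna-seq", "rnaseq",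
      "gene expression", "transcriptom"]),
    ("chipseq", ["chip-seq", "chipseq", "chip seq", "histone", "h3k4", "h3k27",
      "h3k36", "h3k9", "transcription factor", "tf binding", "chip"]),
    ("atacseq", ["atac", "chromatin accessibility", "open chromatin", "dnase"]),
    ("cut_run_tag", ["cut&run", "cut and run", "cut&tag", "cut and tag", "cutana"]),
    ("methylation", ["methylation", "wgbs", "rrbs", "bisulfite", "cpg", "5mc", "5hmc",
      "dnmt", "methylom", "em-seq", "medip"]),
    ("multiomics", ["cite-seq", "cite seq", "multiome", "10x multiome", "share-seq",
      "multi-omic", "multiomics", "rna+atac", "protein and rna"]) ]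

-- ===== PORT A =====
def detect_shards (query : String) : List String :=
  let q := PySem.Str.lower query
  -- scores = {k: 0 for k in MODALITY_SIGNALS}
  let scores0 : PySem.Dict String Int :=
    pvSignals.foldl (fun d p => d.insert p.1 0) PySem.Dict.empty
  -- nested loop: scores[shard_key] += 1 (key always present, so modify with default 0 is exact)
  let scores :=
    pvSignals.foldl (fun d p =>
      p.2.foldl (fun d sig => if PySem.Str.isIn sig q then d.modify p.1 0 (· + 1) else d) d)
      scores0
  -- matched = sorted([k for k, v in scores.items() if v > 0], key=lambda k: -scores[k])
  let matched :=
    PySem.List.sorted (scores.items.filterMap (fun p => if 0 < p.2 then some p.1 else none))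
      (fun k => -(scores.getD k 0))
  if matched = [] then ["rnaseq_singlecell", "rnaseq_snrnaseq", "rnaseq_spatial"]
  else matched

-- ===== PORT B =====
def detect_shards_alt (query : String) : List String :=
  let q := PySem.Str.lower query
  let scores :=
    pvSignals.map (fun p =>
      (p.1, (p.2.map (fun sig => if PySem.Str.isIn sig q then (1 : Int) else 0)).sum))
  let top := PySem.List.maxD (scores.map (fun p => p.2)) (fun v => v) 0
  if top = 0 then ["rnaseq_singlecell", "rnaseq_snrnaseq", "rnaseq_spatial"]
  else
    (PySem.List.pyRange top 0 (-1)).flatMap (fun v =>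
      scores.filterMap (fun p => if p.2 = v then some p.1 else none))

-- ===== PRECONDITION & SPEC =====
def Spec_detect_shards (query : String) (out : List String) : Prop := out = detect_shards_alt query
instance (query : String) (out : List String) : Decidable (Spec_detect_shards query out) := by unfold Spec_detect_shards; infer_instance

-- ===== CLAIM (what is proved, stated in full; the proofs are below) =====
def Claim_equal_detect_shards : Prop := ∀ (query : String), Dom_detect_shards query → Spec_detect_shards query (detect_shards query)

-- ===== LEMMAS AND PROOFS =====

-- the per-shard score of key k (duplicate keys would accumulate; pvSignals has none)
def pvScore (q : String) (k : String) : Int :=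
  ((pvSignals.filter (fun p => p.1 == k)).map
    (fun p => (((p.2.countP (fun sig => PySem.Str.isIn sig q)) : Nat) : Int))).sum


theorem pv_inner_getD (sigs : List String) (c : String → Bool) (k k' : String)
    (d : PySem.Dict String Int) :
    (sigs.foldl (fun d sig => if c sig then d.modify k 0 (· + 1) else d) d).getD k' 0
      = d.getD k' 0 + if k' = k then ((sigs.countP c : Nat) : Int) else 0 := by
  induction sigs generalizing d with
  | nil => simp
  | cons s t ih =>
    simp only [List.foldl_cons, List.countP_cons]
    by_cases hc : c s
    · simp only [hc, if_true, ih, PySem.Dict.getD_modify]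
      by_cases hk : k' = k <;> simp [hk] <;> push_cast <;> ring
    · simp [hc, ih]

theorem pv_inner_contains (sigs : List String) (c : String → Bool) (k k' : String)
    (d : PySem.Dict String Int) (h : d.contains k' = true) :
    (sigs.foldl (fun d sig => if c sig then d.modify k 0 (· + 1) else d) d).contains k' = true := by
  induction sigs generalizing d with
  | nil => exact h
  | cons s t ih =>
    simp only [List.foldl_cons]
    by_cases hc : c s
    · simp only [hc, if_true]
      exact ih _ (by rw [PySem.Dict.contains_modify, h, Bool.or_true])
    · simp only [hc, Bool.false_eq_true, if_false]; exact ih _ h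

theorem pv_inner_keys (sigs : List String) (c : String → Bool) (k : String)
    (d : PySem.Dict String Int) (h : d.contains k = true) :
    (sigs.foldl (fun d sig => if c sig then d.modify k 0 (· + 1) else d) d).keys = d.keys := by
  induction sigs generalizing d with
  | nil => rfl
  | cons s t ih =>
    simp only [List.foldl_cons]
    by_cases hc : c s
    · simp only [hc, if_true]
      rw [ih _ (by rw [PySem.Dict.contains_modify, h, Bool.or_true]),
        PySem.Dict.keys_modify, PySem.Dict.keys_insert_of_contains (h := h)]
    · simp only [hc, Bool.false_eq_true, if_false]; exact ih _ h

theorem pv_outer (c : String → Bool) (pairs : List (String × List String)) :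
    ∀ (d : PySem.Dict String Int), (∀ p ∈ pairs, d.contains p.1 = true) →
    (pairs.foldl (fun d p =>
        p.2.foldl (fun d sig => if c sig then d.modify p.1 0 (· + 1) else d) d) d).keys = d.keys
    ∧ ∀ k', (pairs.foldl (fun d p =>
        p.2.foldl (fun d sig => if c sig then d.modify p.1 0 (· + 1) else d) d) d).getD k' 0
      = d.getD k' 0 + ((pairs.filter (fun p => p.1 == k')).map
          (fun p => ((p.2.countP c : Nat) : Int))).sum := by
  induction pairs with
  | nil => intro d _; simp
  | cons p rest ih =>
    intro d hcont
    simp only [List.foldl_cons]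
    have hdk : d.contains p.1 = true := hcont p (by simp)
    have hrest : ∀ r ∈ rest, (p.2.foldl (fun d sig => if c sig then d.modify p.1 0 (· + 1) else d) d).contains r.1 = true := by
      intro r hr
      exact pv_inner_contains _ _ _ _ _ (hcont r (by simp [hr]))
    obtain ⟨hkeys, hgetD⟩ := ih _ hrest
    constructor
    · rw [hkeys, pv_inner_keys _ _ _ _ hdk]
    · intro k'
      rw [hgetD k', pv_inner_getD]
      by_cases hk : p.1 = k'
      · simp [List.filter_cons, hk, add_assoc]
      · have : ¬ (k' = p.1) := fun h => hk h.symm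
        simp [List.filter_cons, hk, this]


theorem pv_insertBy_append (before : String → String → Bool) (x : String)
    (B C : List String) (h : ∀ y ∈ B, before x y = false) :
    PySem.List.insertBy before x (B ++ C) = B ++ PySem.List.insertBy before x C := by
  induction B with
  | nil => rfl
  | cons b t ih =>
    have hb := h b (by simp)
    simp only [List.cons_append, PySem.List.insertBy, hb]
    simp only [Bool.false_eq_true, if_false]
    rw [ih (fun y hy => h y (by simp [hy]))]

theorem pv_insertBy_front (before : String → String → Bool) (x : String)
    (C : List String) (h : ∀ y ∈ C, before x y = true) :
    PySem.List.insertBy before x C = x :: C := by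
  cases C with
  | nil => rfl
  | cons c t => simp [PySem.List.insertBy, h c (by simp)]

theorem pv_pyRange_desc (t : Int) :
    PySem.List.pyRange t 0 (-1) = (List.range t.toNat).map (fun k : Nat => t - (k : Int)) := by
  unfold PySem.List.pyRange
  norm_num
  by_cases h : 0 < t
  · simp [h, sub_eq_add_neg]
  · have : t.toNat = 0 := by omega
    simp [h, this]

theorem pv_pyRange_desc_cons (t : Int) (h : 0 < t) :
    PySem.List.pyRange t 0 (-1) = t :: PySem.List.pyRange (t - 1) 0 (-1) := by
  rw [pv_pyRange_desc, pv_pyRange_desc]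
  have h1 : t.toNat = (t - 1).toNat + 1 := by omega
  rw [h1, List.range_succ_eq_map]
  simp only [List.map_cons, List.map_map]
  congr 1
  · simp
  · apply List.map_congr_left
    intro k _
    simp only [Function.comp_apply, Nat.succ_eq_add_one]
    push_cast
    ring

theorem pv_mem_pyRange_desc {v t : Int} (h : v ∈ PySem.List.pyRange t 0 (-1)) :
    1 ≤ v ∧ v ≤ t := by
  rw [pv_pyRange_desc] at h
  simp only [List.mem_map, List.mem_range] at h
  obtain ⟨k, hk, rfl⟩ := h
  omega

theorem pv_ins (f : String → Int) : ∀ (n : Nat) (t : Int), t = (n : Int) →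
    ∀ (x : String) (xs : List String), 1 ≤ f x → f x ≤ t →
    PySem.List.insertBy (fun a b => decide (-(f a) < -(f b))) x
        ((PySem.List.pyRange t 0 (-1)).flatMap (fun v => xs.filter (fun k => decide (f k = v))))
      = (PySem.List.pyRange t 0 (-1)).flatMap (fun v => (xs ++ [x]).filter (fun k => decide (f k = v))) := by
  intro n
  induction n with
  | zero => intro t ht x xs h1 h2; omega
  | succ m ih =>
    intro t ht x xs h1 h2
    have hpos : 0 < t := by omega
    rw [pv_pyRange_desc_cons t hpos]
    simp only [List.flatMap_cons]
    -- the top bucket is skipped (no element of it is strictly after x's key)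
    have hskip : ∀ y ∈ xs.filter (fun k => decide (f k = t)), (decide (-(f x) < -(f y))) = false := by
      intro y hy
      have := (List.mem_filter.mp hy).2
      simp only [decide_eq_true_eq] at this
      simp [this]
      omega
    rw [pv_insertBy_append _ _ _ _ hskip]
    by_cases hx : f x = t
    · -- x lands at the end of the top bucket
      have hfront : ∀ y ∈ (PySem.List.pyRange (t-1) 0 (-1)).flatMap (fun v => xs.filter (fun k => decide (f k = v))), (decide (-(f x) < -(f y))) = true := by
        intro y hy
        simp only [List.mem_flatMap] at hy
        obtain ⟨v, hv, hyf⟩ := hy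
        have hvb := pv_mem_pyRange_desc hv
        have := (List.mem_filter.mp hyf).2
        simp only [decide_eq_true_eq] at this
        simp
        omega
      rw [pv_insertBy_front _ _ _ hfront]
      -- right side: top bucket gains x, lower buckets unchanged
      have htop : (xs ++ [x]).filter (fun k => decide (f k = t)) = xs.filter (fun k => decide (f k = t)) ++ [x] := by
        simp [List.filter_append, hx]
      have hlow : ∀ v ∈ PySem.List.pyRange (t-1) 0 (-1),
          (xs ++ [x]).filter (fun k => decide (f k = v)) = xs.filter (fun k => decide (f k = v)) := by
        intro v hv
        have hvb := pv_mem_pyRange_desc hv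
        simp [List.filter_append]
        omega
      rw [htop, List.flatMap_congr hlow]
      simp
    · -- x belongs to a lower bucket: recurse
      have htop : (xs ++ [x]).filter (fun k => decide (f k = t)) = xs.filter (fun k => decide (f k = t)) := by
        simp [List.filter_append]
        omega
      rw [htop, ih (t - 1) (by omega) x xs h1 (by omega)]

theorem pv_bucket (f : String → Int) (t : Int) (xs : List String)
    (h : ∀ k ∈ xs, 1 ≤ f k ∧ f k ≤ t) :
    PySem.List.sorted xs (fun k => -(f k))
      = (PySem.List.pyRange t 0 (-1)).flatMap (fun v => xs.filter (fun k => decide (f k = v))) := by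
  induction xs using List.reverseRecOn with
  | nil => simp [PySem.List.sorted]
  | append_singleton xs x ih =>
    rw [PySem.List.sorted_eq_foldl_insertBy, List.foldl_append]
    simp only [List.foldl_cons, List.foldl_nil]
    rw [← PySem.List.sorted_eq_foldl_insertBy,
      ih (fun k hk => h k (by simp [hk]))]
    have hx := h x (by simp)
    have : ∃ n : Nat, t = (n : Int) := ⟨t.toNat, by omega⟩
    obtain ⟨n, hn⟩ := this
    exact pv_ins f n t hn x xs hx.1 hx.2


theorem pv_filterMap_guard (P : String → Prop) [DecidablePred P] (xs : List String) :
    xs.filterMap (fun k => if P k then some k else none) = xs.filter (fun k => decide (P k)) := by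
  induction xs with
  | nil => rfl
  | cons x t ih => by_cases h : P x <;> simp [h, ih]

theorem pv_filter_single {α β : Type} [DecidableEq α] (pairs : List (α × β))
    (hnd : (pairs.map Prod.fst).Nodup) (p : α × β) (hp : p ∈ pairs) :
    pairs.filter (fun r => r.1 == p.1) = [p] := by
  induction pairs with
  | nil => simp at hp
  | cons r rest ih =>
    simp only [List.map_cons, List.nodup_cons] at hnd
    rcases List.mem_cons.mp hp with rfl | hmem
    · have : rest.filter (fun r' => r'.1 == p.1) = [] := by
        apply List.filter_eq_nil_iff.mpr
        intro a ha
        simp only [beq_iff_eq]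
        intro hEq
        exact hnd.1 (hEq ▸ List.mem_map_of_mem ha)
      simp [List.filter_cons, this]
    · have hne : ¬ (r.1 = p.1) := by
        intro hEq
        exact hnd.1 (hEq ▸ List.mem_map_of_mem hmem)
      simp only [List.filter_cons, beq_iff_eq, hne, decide_false]
      exact ih hnd.2 hmem

theorem pv_maxD_spec (xs : List Int) (h : xs ≠ []) :
    (∀ y ∈ xs, y ≤ PySem.List.maxD xs (fun v => v) 0)
    ∧ PySem.List.maxD xs (fun v => v) 0 ∈ xs := by
  cases xs with
  | nil => exact absurd rfl h
  | cons x t =>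
    have hm : PySem.List.maxD (x :: t) (fun v => v) 0 = t.foldl max x := by
      simp [PySem.List.maxD, PySem.List.max?_id_cons]
    rw [hm]
    refine ⟨?_, ?_⟩
    · intro y hy
      rcases List.mem_cons.mp hy with rfl | hy'
      · exact (PySem.List.le_foldl_max t y).1
      · exact ((PySem.List.le_foldl_max t x).2) y hy'
    · rcases PySem.List.foldl_max_mem t x with hEq | hmem
      · simp [hEq]
      · exact List.mem_cons_of_mem _ hmem

-- ===== VERDICT (by name: the statement is the Claim_ definition above) =====
theorem detect_shards_spec : Claim_equal_detect_shards := by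
  intro query _
  unfold Spec_detect_shards detect_shards detect_shards_alt
  simp only []
  set q := PySem.Str.lower query with hq
  set c : String → Bool := fun sig => PySem.Str.isIn sig q with hc
  set sc : String → Int := pvScore q with hsc
  set K : List String := pvSignals.map Prod.fst with hK
  -- 1. the initial dict {k: 0}
  have hitems0 : (pvSignals.foldl (fun d p => d.insert p.1 0) PySem.Dict.empty).items
      = pvSignals.map (fun p => (p.1, (0 : Int))) := by
    have := PySem.Dict.items_foldl_insert_fresh (l := pvSignals) (k := Prod.fst)
      (v := fun _ => (0 : Int)) (d := PySem.Dict.empty)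
      (by intro a _; simp) (by decide)
    simpa using this
  set d0 : PySem.Dict String Int := pvSignals.foldl (fun d p => d.insert p.1 0) PySem.Dict.empty with hd0
  have hkeys0 : d0.keys = K := by
    simp only [PySem.Dict.keys, hitems0, List.map_map, hK]
    rfl
  have hnodupK : K.Nodup := by rw [hK]; decide
  have hzero : ∀ k', d0.getD k' 0 = 0 := by
    intro k'
    by_cases hcont : d0.contains k' = true
    · have hk' : k' ∈ d0.keys := (PySem.Dict.contains_iff_mem_keys d0 k').mp hcont
      rw [hkeys0, hK] at hk'
      obtain ⟨p, hp, rfl⟩ := List.mem_map.mp hk'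
      exact PySem.Dict.getD_of_mem_items d0 (by rw [hitems0]; exact List.mem_map_of_mem hp)
        (by rw [hkeys0]; exact hnodupK) 0
    · exact PySem.Dict.getD_of_not_contains d0 0 (by simpa using hcont)
  -- 2. the score dict after the nested loop
  set ds : PySem.Dict String Int := pvSignals.foldl (fun d p =>
      p.2.foldl (fun d sig => if PySem.Str.isIn sig q then d.modify p.1 0 (· + 1) else d) d) d0 with hds
  have houter := pv_outer c pvSignals d0 (by
    intro p hp
    apply (PySem.Dict.contains_iff_mem_keys d0 p.1).mpr
    rw [hkeys0, hK]
    exact List.mem_map_of_mem hp)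
  have hkeys : ds.keys = K := by rw [hds] at *; rw [houter.1, hkeys0]
  have hgetD : ∀ k', ds.getD k' 0 = sc k' := by
    intro k'
    rw [hds] at *
    rw [houter.2 k', hzero k', hsc]
    simp [pvScore, hc]
  -- 3. A's items / matched list
  have hitems : ds.items = K.map (fun k => (k, sc k)) := by
    rw [PySem.Dict.items_eq_map_keys ds (hkeys ▸ hnodupK) 0, hkeys]
    exact List.map_congr_left (fun k _ => by rw [hgetD])
  set XS : List String := K.filter (fun k => decide (0 < sc k)) with hXS
  have hmatchedlist : ds.items.filterMap (fun p => if 0 < p.2 then some p.1 else none) = XS := by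
    rw [hitems, List.filterMap_map]
    have := pv_filterMap_guard (fun k => 0 < sc k) K
    simpa [Function.comp] using this
  have hkeyfun : (fun k => -(ds.getD k 0)) = (fun k => -(sc k)) := by
    funext k; rw [hgetD]
  rw [hmatchedlist, hkeyfun]
  -- 4. B's score list
  have hscoresB : pvSignals.map (fun p =>
      (p.1, (p.2.map (fun sig => if PySem.Str.isIn sig q then (1 : Int) else 0)).sum))
      = K.map (fun k => (k, sc k)) := by
    rw [hK, List.map_map]
    apply List.map_congr_left
    intro p hp
    have hsum := PySem.List.sum_map_ite_one_zero c p.2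
    simp only [Function.comp_apply]
    rw [hc] at hsum
    rw [hsum, hsc, pvScore]
    rw [pv_filter_single pvSignals (by decide) p hp]
    simp [hc]
  rw [hscoresB]
  -- 5. top = max of the scores
  set top : Int := PySem.List.maxD ((K.map (fun k => (k, sc k))).map (fun p => p.2)) (fun v => v) 0 with htop
  have hvals : (K.map (fun k => (k, sc k))).map (fun p => p.2) = K.map sc := by
    rw [List.map_map]; rfl
  have hVne : K.map sc ≠ [] := by rw [hK]; simp [pvSignals]
  have hmax := pv_maxD_spec (K.map sc) hVne
  rw [hvals] at htop
  have hub : ∀ k ∈ K, sc k ≤ top := by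
    intro k hk
    exact (htop ▸ hmax.1) (sc k) (List.mem_map_of_mem hk)
  have hsc_nonneg : ∀ k, 0 ≤ sc k := by
    intro k
    rw [hsc, pvScore]
    apply List.sum_nonneg
    intro x hx
    obtain ⟨p, _, rfl⟩ := List.mem_map.mp hx
    positivity
  by_cases h0 : top = 0
  · -- no signal: both return the default
    have hXSnil : XS = [] := by
      rw [hXS]
      apply List.filter_eq_nil_iff.mpr
      intro k hk
      have := hub k hk
      simp
      omega
    rw [hXSnil]
    simp [PySem.List.sorted, h0]
  · -- some signal: both return the bucket concatenation
    have h1 : 1 ≤ top := by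
      have := htop ▸ hmax.2
      obtain ⟨k, _, hkeq⟩ := List.mem_map.mp (hvals ▸ this)
      have := hsc_nonneg k
      omega
    have hXSne : XS ≠ [] := by
      have hmem := hvals ▸ (htop ▸ hmax.2)
      obtain ⟨k0, hk0, hk0eq⟩ := List.mem_map.mp hmem
      rw [hXS]
      intro hnil
      have : k0 ∈ K.filter (fun k => decide (0 < sc k)) :=
        List.mem_filter.mpr ⟨hk0, by simp; omega⟩
      rw [hnil] at this
      simp at this
    have hbucket := pv_bucket sc top XS (by
      intro k hk
      have hk' := List.mem_filter.mp hk
      have : 0 < sc k := by simpa using hk'.2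
      exact ⟨this, hub k hk'.1⟩)
    rw [if_neg (by
      intro hEq
      exact hXSne ((PySem.List.sorted_eq_nil_iff XS (fun k => -(sc k)) false).mp hEq))]
    rw [if_neg h0, hbucket]
    apply List.flatMap_congr
    intro v hv
    have hv1 := (pv_mem_pyRange_desc hv).1
    have hguard : (K.map (fun k => (k, sc k))).filterMap (fun p => if p.2 = v then some p.1 else none)
        = K.filter (fun k => decide (sc k = v)) := by
      rw [List.filterMap_map]
      have := pv_filterMap_guard (fun k => sc k = v) K
      simpa [Function.comp] using this
    rw [hguard, hXS, List.filter_filter]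
    apply List.filter_congr
    intro k _
    by_cases hkv : sc k = v
    · simp [hkv]; omega
    · simp [hkv]
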